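-- pv_equiv track=rewrite | github.com/Thakar-Lab/scBONITA | src/scBONITA/keggParser.py | expand_groups
-- ===== SOURCE A (Python) =====
-- def expand_groups(node_id, groups):
--     """
--     node_id: a node ID that may be a group
--     groups: store group IDs and list of sub-ids
--     return value: a list that contains all group IDs deconvoluted
--     """
--     node_list = []
--     if node_id in groups.keys():
--         for component_id in groups[node_id]:
--             node_list.extend(expand_groups(component_id, groups))
--     else:
--         node_list.extend([node_id])
--     return node_list
-- ===== SOURCE B (Python) =====
-- def expand_groups(node_id, groups):
--     stack = [node_id]
--     out = []
--     while stack: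
--         x = stack.pop()
--         if x in groups:
--             stack.extend(reversed(groups[x]))
--         else:
--             out.append(x)
--     return out
-- ===== Notes on version B (the rewrite author's own statement) =====
-- stated objective: alternative
-- what changed: Replaces A's recursion over the group tree by an explicit LIFO stack loop that pushes each group's component ids reversed and appends leaf ids to one output list, instead of building and extending nested result lists from recursive calls.
import Mathlib
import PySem

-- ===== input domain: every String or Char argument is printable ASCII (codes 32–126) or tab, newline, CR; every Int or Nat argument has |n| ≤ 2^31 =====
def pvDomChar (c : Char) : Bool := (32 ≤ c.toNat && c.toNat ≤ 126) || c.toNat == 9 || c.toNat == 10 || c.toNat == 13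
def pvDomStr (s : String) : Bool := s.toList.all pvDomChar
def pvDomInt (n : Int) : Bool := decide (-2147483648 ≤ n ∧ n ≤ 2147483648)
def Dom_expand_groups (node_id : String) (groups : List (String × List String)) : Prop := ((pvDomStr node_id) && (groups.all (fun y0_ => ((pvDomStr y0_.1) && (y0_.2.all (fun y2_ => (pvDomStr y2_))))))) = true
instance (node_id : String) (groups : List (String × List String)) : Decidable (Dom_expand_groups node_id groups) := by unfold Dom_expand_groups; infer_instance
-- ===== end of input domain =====

-- B replaces A's recursion over the group tree by an explicit LIFO stack loop (children pushed
-- reversed), appending each leaf once; equivalence is proved on Pre_ (no group-reference cycle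
-- reachable from node_id — exactly where Python A's recursion terminates).

-- first-match lookup groups[x] (Python dict access; `x in groups.keys()` is `.isSome`)
def pvLook (g : List (String × List String)) (x : String) : Option (List String) :=
  PySem.Dict.get? (PySem.Dict.mk g) x

-- ===== PORT A =====
-- A's recursion, made total by a fuel argument; on inputs satisfying Pre_ the fuel
-- groups.length + 1 is proved sufficient (call depth ≤ number of reachable group keys + 1),
-- so the fuel-0 default is never reached there.
def pvExpA (g : List (String × List String)) : Nat → String → List String
  | 0, _ => []
  | n + 1, x =>
    match pvLook g x with
    | some comps => comps.foldl (fun acc c => acc ++ pvExpA g n c) []   -- node_list.extend(expand_groups(component_id, groups))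
    | none => [x]                                                        -- node_list.extend([node_id])

def expand_groups (node_id : String) (groups : List (String × List String)) : List String :=
  pvExpA groups (groups.length + 1) node_id

-- ===== PORT B =====
-- helpers computing the fuel bound (a termination guard only; proved sufficient under Pre_)
def pvSuccs (g : List (String × List String)) (x : String) : List String := (pvLook g x).getD []

def pvAddAll (s cs : List String) : List String :=
  cs.foldl (fun acc c => if c ∈ acc then acc else acc ++ [c]) s

def pvStep (g : List (String × List String)) (s : List String) : List String :=
  pvAddAll s (s.flatMap (pvSuccs g))

def pvUniv (g : List (String × List String)) (s : List String) : List String :=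
  s ++ g.flatMap (fun p => p.1 :: p.2)

-- all ids reachable from the ids in s through the group mapping
def pvClosure (g : List (String × List String)) (s : List String) : List String :=
  (pvStep g)^[(pvUniv g s).length] s.dedup

def pvIsKey (g : List (String × List String)) (x : String) : Bool := (pvLook g x).isSome

-- number of group keys reachable from x (the recursion-depth measure)
def pvMu (g : List (String × List String)) (x : String) : Nat :=
  ((pvClosure g [x]).filter (pvIsKey g)).length

def pvMaxLen (g : List (String × List String)) : Nat :=
  g.foldl (fun m p => max m p.2.length) 0

-- fuel for the stack loop: an upper bound on the number of pops, proved sufficient under Pre_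
def pvW (g : List (String × List String)) (x : String) : Nat :=
  (pvMaxLen g + 2) ^ (pvMu g x + 1)

-- the stack loop; stack head = top of the Python list (pop from the head, push at the head),
-- so `stack.extend(reversed(groups[x]))` followed by pops is `comps ++ rest`
def pvRunStack (g : List (String × List String)) : Nat → List String → List String → List String
  | 0, _, out => out
  | _ + 1, [], out => out
  | n + 1, x :: rest, out =>
    match pvLook g x with
    | some comps => pvRunStack g n (comps ++ rest) out
    | none => pvRunStack g n rest (out ++ [x])

def expand_groups_alt (node_id : String) (groups : List (String × List String)) : List String :=
  pvRunStack groups (pvW groups node_id) [node_id] []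

-- ===== PRECONDITION & SPEC =====
-- Pre_ excludes exactly the inputs where a group-reference cycle is reachable from node_id:
-- there Python A recurses forever (RecursionError), returning no value.
def Pre_expand_groups (node_id : String) (groups : List (String × List String)) : Prop :=
  ∀ k ∈ pvClosure groups [node_id], pvIsKey groups k = true → k ∉ pvClosure groups (pvSuccs groups k)
instance (node_id : String) (groups : List (String × List String)) : Decidable (Pre_expand_groups node_id groups) := by unfold Pre_expand_groups; infer_instance

def pvWitness_expand_groups : String × (List (String × List String)) :=
  ("g1", [("g1", ["a", "g2"]), ("g2", ["b", "a"])])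

def Spec_expand_groups (node_id : String) (groups : List (String × List String)) (out : List String) : Prop := out = expand_groups_alt node_id groups
instance (node_id : String) (groups : List (String × List String)) (out : List String) : Decidable (Spec_expand_groups node_id groups out) := by unfold Spec_expand_groups; infer_instance

-- ===== CLAIM (what is proved, stated in full; the proofs are below) =====
def Claim_equal_expand_groups : Prop := ∀ (node_id : String) (groups : List (String × List String)), Dom_expand_groups node_id groups → Pre_expand_groups node_id groups → Spec_expand_groups node_id groups (expand_groups node_id groups)

-- ===== LEMMAS AND PROOFS =====

-- total fuel weight of a stack (proof-side measure)
def pvWs (g : List (String × List String)) (s : List String) : Nat := (s.map (pvW g)).sum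

theorem pvAddAll_exists_append (cs s : List String) : ∃ t, pvAddAll s cs = s ++ t := by
  induction cs generalizing s with
  | nil => exact ⟨[], by simp [pvAddAll]⟩
  | cons c cs ih =>
    simp only [pvAddAll, List.foldl_cons] at *
    by_cases h : c ∈ s
    · simpa [h] using ih s
    · obtain ⟨t, ht⟩ := ih (s ++ [c])
      exact ⟨[c] ++ t, by simp [h, ht]⟩

theorem pvAddAll_mem (cs s : List String) (a : String) :
    a ∈ pvAddAll s cs ↔ a ∈ s ∨ a ∈ cs := by
  induction cs generalizing s with
  | nil => simp [pvAddAll]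
  | cons c cs ih =>
    simp only [pvAddAll, List.foldl_cons] at *
    by_cases h : c ∈ s
    · rw [if_pos h, ih]
      constructor
      · rintro (h1 | h1)
        · exact Or.inl h1
        · exact Or.inr (List.mem_cons_of_mem c h1)
      · rintro (h1 | h1)
        · exact Or.inl h1
        · rcases List.mem_cons.mp h1 with rfl | h1
          · exact Or.inl h
          · exact Or.inr h1
    · rw [if_neg h, ih]
      simp only [List.mem_append, List.mem_cons]
      tauto

theorem pvAddAll_nodup (cs s : List String) (hs : s.Nodup) : (pvAddAll s cs).Nodup := by
  induction cs generalizing s with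
  | nil => exact hs
  | cons c cs ih =>
    simp only [pvAddAll, List.foldl_cons]
    by_cases h : c ∈ s
    · rw [if_pos h]; exact ih s hs
    · rw [if_neg h]
      refine ih _ ?_
      simp only [List.nodup_append, List.nodup_singleton, true_and, hs]
      intro a ha b hb
      simp only [List.mem_singleton] at hb
      exact fun heq => h ((heq.trans hb) ▸ ha)

theorem pvStep_mem (g : List (String × List String)) (s : List String) (a : String) :
    a ∈ pvStep g s ↔ a ∈ s ∨ ∃ y ∈ s, a ∈ pvSuccs g y := by
  rw [pvStep, pvAddAll_mem]; simp [List.mem_flatMap]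

theorem pvStep_subset_self (g : List (String × List String)) (s : List String) : s ⊆ pvStep g s := by
  intro a ha; rw [pvStep_mem]; exact Or.inl ha

theorem pvStep_nodup (g : List (String × List String)) (s : List String) (hs : s.Nodup) :
    (pvStep g s).Nodup := pvAddAll_nodup _ _ hs

theorem pvStep_subset_of_closed (g : List (String × List String)) (s T : List String)
    (h1 : s ⊆ T) (h2 : ∀ y ∈ T, pvSuccs g y ⊆ T) : pvStep g s ⊆ T := by
  intro a ha
  rcases (pvStep_mem g s a).mp ha with h | ⟨y, hy, hay⟩
  · exact h1 h
  · exact h2 y (h1 hy) hay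

theorem pvSuccs_subset (g : List (String × List String)) (x : String) :
    pvSuccs g x ⊆ g.flatMap (fun p => p.1 :: p.2) := by
  intro a ha
  unfold pvSuccs at ha
  cases hl : pvLook g x with
  | none => simp [hl] at ha
  | some v =>
    rw [hl] at ha
    have hx : (x, v) ∈ (PySem.Dict.mk g).items :=
      PySem.Dict.mem_items_of_get?_eq_some (PySem.Dict.mk g) hl
    simp only [List.mem_flatMap]
    refine ⟨(x, v), hx, List.mem_cons_of_mem _ ?_⟩
    simpa using ha

theorem pvStep_fixed_iter (g : List (String × List String)) (s : List String)
    (h : pvStep g s = s) : ∀ n, (pvStep g)^[n] s = s := by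
  intro n
  induction n with
  | zero => rfl
  | succ n ih => rw [Function.iterate_succ_apply', ih, h]

theorem pvStep_length_lt (g : List (String × List String)) (s : List String)
    (h : pvStep g s ≠ s) : s.length < (pvStep g s).length := by
  obtain ⟨t, ht⟩ := pvAddAll_exists_append (s.flatMap (pvSuccs g)) s
  have ht' : pvStep g s = s ++ t := ht
  cases t with
  | nil => exact absurd (by simp [ht']) h
  | cons a t => simp [ht']

theorem pvIter_subset_univ (g : List (String × List String)) (s : List String) (n : Nat) :
    (pvStep g)^[n] s.dedup ⊆ pvUniv g s := by
  induction n with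
  | zero =>
    intro a ha
    exact List.mem_append_left _ (List.dedup_subset s ha)
  | succ n ih =>
    rw [Function.iterate_succ_apply']
    refine pvStep_subset_of_closed g _ _ ih ?_
    intro y _ a ha
    exact List.mem_append_right _ (pvSuccs_subset g y ha)

theorem pvIter_nodup (g : List (String × List String)) (s : List String) (n : Nat) :
    ((pvStep g)^[n] s.dedup).Nodup := by
  induction n with
  | zero => exact List.nodup_dedup s
  | succ n ih => rw [Function.iterate_succ_apply']; exact pvStep_nodup g _ ih

theorem pvClosure_nodup (g : List (String × List String)) (s : List String) :
    (pvClosure g s).Nodup := pvIter_nodup g s _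

theorem pvClosure_subset_self (g : List (String × List String)) (s : List String) :
    s ⊆ pvClosure g s := by
  unfold pvClosure
  generalize (pvUniv g s).length = n
  induction n with
  | zero => intro a ha; exact List.mem_dedup.mpr ha
  | succ n ih =>
    rw [Function.iterate_succ_apply']
    exact fun a ha => pvStep_subset_self g _ (ih ha)

-- the iterate reaches a fixpoint: pigeonhole on lengths inside pvUniv
theorem pvClosure_fixed (g : List (String × List String)) (s : List String) :
    pvStep g (pvClosure g s) = pvClosure g s := by
  unfold pvClosure
  generalize hN : (pvUniv g s).length = N
  by_contra hfix
  have hnotfix : ∀ i, i ≤ N → pvStep g ((pvStep g)^[i] s.dedup) ≠ (pvStep g)^[i] s.dedup := by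
    intro i hi h
    obtain ⟨j, hj⟩ := Nat.exists_eq_add_of_le hi
    apply hfix
    rw [hj, Nat.add_comm, Function.iterate_add_apply, pvStep_fixed_iter g _ h j, h]
  have hgrow : ∀ i, i ≤ N → s.dedup.length + i ≤ ((pvStep g)^[i] s.dedup).length := by
    intro i
    induction i with
    | zero => simp
    | succ i ih =>
      intro hi
      rw [Function.iterate_succ_apply']
      have h1 := pvStep_length_lt g _ (hnotfix i (by omega))
      have h2 := ih (by omega)
      omega
  have h1 := hgrow N (le_refl N)
  have h2 : ((pvStep g)^[N] s.dedup).length ≤ N := by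
    have hsub : (pvStep g)^[N] s.dedup ⊆ pvUniv g s := by
      have := pvIter_subset_univ g s N
      exact this
    have hnd : ((pvStep g)^[N] s.dedup).Nodup := pvIter_nodup g s N
    calc ((pvStep g)^[N] s.dedup).length
        = ((pvStep g)^[N] s.dedup).toFinset.card := (List.toFinset_card_of_nodup hnd).symm
      _ ≤ (pvUniv g s).toFinset.card := Finset.card_le_card (fun a ha => by
            rw [List.mem_toFinset] at *; exact hsub ha)
      _ ≤ (pvUniv g s).length := List.toFinset_card_le _
      _ = N := hN
  have hsnil : s.dedup = [] := List.length_eq_zero_iff.mp (by omega)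
  exact hnotfix 0 (Nat.zero_le N) (by simp [hsnil, pvStep, pvAddAll])

theorem pvClosure_closed (g : List (String × List String)) (s : List String)
    {y : String} (hy : y ∈ pvClosure g s) : pvSuccs g y ⊆ pvClosure g s := by
  intro a ha
  rw [← pvClosure_fixed g s, pvStep_mem]
  exact Or.inr ⟨y, hy, ha⟩

theorem pvClosure_minimal (g : List (String × List String)) (s T : List String)
    (h1 : s ⊆ T) (h2 : ∀ y ∈ T, pvSuccs g y ⊆ T) : pvClosure g s ⊆ T := by
  unfold pvClosure
  generalize (pvUniv g s).length = n
  induction n with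
  | zero => exact fun a ha => h1 (List.dedup_subset s ha)
  | succ n ih =>
    rw [Function.iterate_succ_apply']
    exact pvStep_subset_of_closed g _ T ih h2

-- μ decreases strictly from a reachable key to its components (uses Pre_)
theorem pvMu_lt (node : String) (g : List (String × List String))
    (H : Pre_expand_groups node g) {x c : String}
    (hx : x ∈ pvClosure g [node]) (hk : pvIsKey g x = true) (hc : c ∈ pvSuccs g x) :
    pvMu g c < pvMu g x := by
  have hcx : c ∈ pvClosure g [x] :=
    pvClosure_closed g [x] (pvClosure_subset_self g [x] (by simp)) hc
  have hsub : pvClosure g [c] ⊆ pvClosure g [x] :=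
    pvClosure_minimal g [c] _ (by simpa using hcx) (fun y hy => pvClosure_closed g [x] hy)
  have hxc : x ∉ pvClosure g [c] := by
    intro hmem
    have hsub2 : pvClosure g [c] ⊆ pvClosure g (pvSuccs g x) :=
      pvClosure_minimal g [c] _ (by simpa using pvClosure_subset_self g (pvSuccs g x) hc)
        (fun y hy => pvClosure_closed g _ hy)
    exact H x hx hk (hsub2 hmem)
  have hxx : x ∈ (pvClosure g [x]).filter (pvIsKey g) :=
    List.mem_filter.mpr ⟨pvClosure_subset_self g [x] (by simp), hk⟩
  have hfsub : (pvClosure g [c]).filter (pvIsKey g) ⊆ (pvClosure g [x]).filter (pvIsKey g) := by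
    intro a ha
    rcases List.mem_filter.mp ha with ⟨ha1, ha2⟩
    exact List.mem_filter.mpr ⟨hsub ha1, ha2⟩
  have hnd1 : ((pvClosure g [c]).filter (pvIsKey g)).Nodup := (pvClosure_nodup g [c]).filter _
  have hnd2 : ((pvClosure g [x]).filter (pvIsKey g)).Nodup := (pvClosure_nodup g [x]).filter _
  unfold pvMu
  rw [← List.toFinset_card_of_nodup hnd1, ← List.toFinset_card_of_nodup hnd2]
  apply Finset.card_lt_card
  constructor
  · intro a ha; rw [List.mem_toFinset] at *; exact hfsub ha
  · intro hTs
    have := hTs (List.mem_toFinset.mpr hxx)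
    rw [List.mem_toFinset, List.mem_filter] at this
    exact hxc this.1

theorem pvMu_le (g : List (String × List String)) (x : String) : pvMu g x ≤ g.length := by
  have hnd : ((pvClosure g [x]).filter (pvIsKey g)).Nodup := (pvClosure_nodup g [x]).filter _
  have hsub : (pvClosure g [x]).filter (pvIsKey g) ⊆ g.map Prod.fst := by
    intro a ha
    rcases List.mem_filter.mp ha with ⟨_, hk⟩
    unfold pvIsKey at hk
    cases hl : pvLook g a with
    | none => rw [hl] at hk; simp at hk
    | some v =>
      have := PySem.Dict.mem_items_of_get?_eq_some (PySem.Dict.mk g) hl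
      exact List.mem_map.mpr ⟨(a, v), this, rfl⟩
  calc pvMu g x = ((pvClosure g [x]).filter (pvIsKey g)).toFinset.card :=
        (List.toFinset_card_of_nodup hnd).symm
    _ ≤ (g.map Prod.fst).toFinset.card := Finset.card_le_card (fun a ha => by
          rw [List.mem_toFinset] at *; exact hsub ha)
    _ ≤ (g.map Prod.fst).length := List.toFinset_card_le _
    _ = g.length := List.length_map Prod.fst

-- x itself is a reachable key, so μ x is positive when x is a key
theorem pvMu_pos (g : List (String × List String)) {x : String} {v : List String}
    (hl : pvLook g x = some v) : 0 < pvMu g x := by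
  have hxx : x ∈ (pvClosure g [x]).filter (pvIsKey g) :=
    List.mem_filter.mpr ⟨pvClosure_subset_self g [x] (by simp), by simp [pvIsKey, hl]⟩
  unfold pvMu
  exact List.length_pos_iff.mpr (fun h => by simp [h] at hxx)

-- A's fuelled recursion is stable once the fuel exceeds μ
theorem pvExpA_stable (node : String) (g : List (String × List String))
    (H : Pre_expand_groups node g) :
    ∀ n x, x ∈ pvClosure g [node] → pvMu g x ≤ n →
      ∀ k m, pvMu g x < k → pvMu g x < m → pvExpA g k x = pvExpA g m x := by
  intro n
  induction n with
  | zero =>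
    intro x hx hmu k m hk hm
    cases k with
    | zero => omega
    | succ k' =>
      cases m with
      | zero => omega
      | succ m' =>
        have hleaf : pvLook g x = none := by
          cases hl : pvLook g x with
          | none => rfl
          | some v => exact absurd (pvMu_pos g hl) (by omega)
        simp [pvExpA, hleaf]
  | succ n ih =>
    intro x hx hmu k m hk hm
    cases k with
    | zero => omega
    | succ k' =>
      cases m with
      | zero => omega
      | succ m' =>
        cases hl : pvLook g x with
        | none => simp [pvExpA, hl]
        | some comps =>
          simp only [pvExpA, hl]
          apply PySem.List.foldl_congr_mem
          intro acc c hc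
          have hck : pvMu g c < pvMu g x :=
            pvMu_lt node g H hx (by simp [pvIsKey, hl]) (by simp [pvSuccs, hl, hc])
          have hcC : c ∈ pvClosure g [node] :=
            pvClosure_closed g [node] hx (by simp [pvSuccs, hl, hc])
          rw [ih c hcC (by omega) k' m' (by omega) (by omega)]

theorem pvW_pos (g : List (String × List String)) (x : String) : 0 < pvW g x :=
  Nat.pow_pos (by omega)

theorem pvComps_len_le (g : List (String × List String)) {x : String} {comps : List String}
    (hl : pvLook g x = some comps) : comps.length ≤ pvMaxLen g := by
  have hmem : (x, comps) ∈ (PySem.Dict.mk g).items :=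
    PySem.Dict.mem_items_of_get?_eq_some (PySem.Dict.mk g) hl
  exact (PySem.List.le_foldl_max_nat g (fun p => p.2.length) 0).2 (x, comps) hmem

-- total stack weight strictly decreases when a key is popped and its components pushed
theorem pvWs_comps_lt (node : String) (g : List (String × List String))
    (H : Pre_expand_groups node g) {x : String} {comps : List String}
    (hx : x ∈ pvClosure g [node]) (hl : pvLook g x = some comps) :
    pvWs g comps < pvW g x := by
  have hterm : ∀ c ∈ comps, pvW g c ≤ (pvMaxLen g + 2) ^ (pvMu g x) := by
    intro c hc
    have hck : pvMu g c < pvMu g x :=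
      pvMu_lt node g H hx (by simp [pvIsKey, hl]) (by simp [pvSuccs, hl, hc])
    exact Nat.pow_le_pow_right (by omega) (by omega)
  have hsum : pvWs g comps ≤ comps.length * (pvMaxLen g + 2) ^ (pvMu g x) := by
    unfold pvWs
    calc (comps.map (pvW g)).sum
        ≤ (comps.map (fun _ => (pvMaxLen g + 2) ^ (pvMu g x))).sum :=
          List.sum_le_sum (fun c hc => hterm c hc)
      _ = comps.length * (pvMaxLen g + 2) ^ (pvMu g x) := by
          rw [List.map_const', List.sum_replicate, smul_eq_mul]
  have hlen : comps.length ≤ pvMaxLen g := pvComps_len_le g hl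
  have hpow : 0 < (pvMaxLen g + 2) ^ (pvMu g x) := Nat.pow_pos (by omega)
  have hstep : pvMaxLen g * (pvMaxLen g + 2) ^ (pvMu g x)
      < (pvMaxLen g + 2) * (pvMaxLen g + 2) ^ (pvMu g x) :=
    Nat.mul_lt_mul_of_lt_of_le (by omega) (le_refl _) hpow
  have hW : pvW g x = (pvMaxLen g + 2) * (pvMaxLen g + 2) ^ (pvMu g x) := by
    unfold pvW
    rw [pow_succ]
    ring
  have hmul : comps.length * (pvMaxLen g + 2) ^ (pvMu g x)
      ≤ pvMaxLen g * (pvMaxLen g + 2) ^ (pvMu g x) := Nat.mul_le_mul_right _ hlen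
  omega

-- the stack loop computes out ++ flatMap of the recursive expansion
theorem pvRunStack_eq (node : String) (g : List (String × List String))
    (H : Pre_expand_groups node g) :
    ∀ n stack out, (∀ x ∈ stack, x ∈ pvClosure g [node]) → pvWs g stack ≤ n →
      pvRunStack g n stack out = out ++ stack.flatMap (fun x => pvExpA g (pvMu g x + 1) x) := by
  intro n
  induction n with
  | zero =>
    intro stack out hmem hw
    cases stack with
    | nil => simp [pvRunStack]
    | cons x rest =>
      exfalso
      have h1 : pvW g x + (rest.map (pvW g)).sum ≤ 0 := by simpa [pvWs] using hw
      have := pvW_pos g x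
      omega
  | succ n ih =>
    intro stack out hmem hw
    cases stack with
    | nil => simp [pvRunStack]
    | cons x rest =>
      have hxC : x ∈ pvClosure g [node] := hmem x (by simp)
      have hwx : pvWs g (x :: rest) = pvW g x + pvWs g rest := by simp [pvWs]
      cases hl : pvLook g x with
      | some comps =>
        simp only [pvRunStack, hl]
        have hcm : ∀ c ∈ comps ++ rest, c ∈ pvClosure g [node] := by
          intro c hc
          rcases List.mem_append.mp hc with hc | hc
          · exact pvClosure_closed g [node] hxC (by simp [pvSuccs, hl, hc])
          · exact hmem c (by simp [hc])
        have hwlt : pvWs g (comps ++ rest) ≤ n := by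
          have h1 : pvWs g comps < pvW g x := pvWs_comps_lt node g H hxC hl
          have h2 : pvWs g (comps ++ rest) = pvWs g comps + pvWs g rest := by simp [pvWs]
          omega
        rw [ih _ out hcm hwlt]
        congr 1
        rw [List.flatMap_append, List.flatMap_cons]
        congr 1
        have hx1 : pvExpA g (pvMu g x + 1) x
            = comps.foldl (fun acc c => acc ++ pvExpA g (pvMu g x) c) [] := by
          simp [pvExpA, hl]
        rw [hx1, PySem.List.foldl_append_eq_flatMap]
        simp only [List.nil_append]
        refine List.flatMap_congr (fun c hc => ?_)
        have hck : pvMu g c < pvMu g x :=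
          pvMu_lt node g H hxC (by simp [pvIsKey, hl]) (by simp [pvSuccs, hl, hc])
        have hcC : c ∈ pvClosure g [node] :=
          pvClosure_closed g [node] hxC (by simp [pvSuccs, hl, hc])
        exact (pvExpA_stable node g H (pvMu g c) c hcC (le_refl _) (pvMu g x) (pvMu g c + 1)
          hck (Nat.lt_succ_self _)).symm
      | none =>
        simp only [pvRunStack, hl]
        have hwr : pvWs g rest ≤ n := by have := pvW_pos g x; omega
        rw [ih rest (out ++ [x]) (fun c hc => hmem c (by simp [hc])) hwr]
        have hx1 : pvExpA g (pvMu g x + 1) x = [x] := by simp [pvExpA, hl]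
        simp [hx1]

-- ===== VERDICT (by name: the statement is the Claim_ definition above) =====
theorem expand_groups_spec : Claim_equal_expand_groups := by
  intro node g _hdom H
  unfold Spec_expand_groups expand_groups expand_groups_alt
  have hnode : node ∈ pvClosure g [node] := pvClosure_subset_self g [node] (by simp)
  rw [pvRunStack_eq node g H (pvW g node) [node] [] (by simpa using hnode) (by simp [pvWs])]
  simp only [List.flatMap_cons, List.flatMap_nil, List.nil_append, List.append_nil]
  exact pvExpA_stable node g H (pvMu g node) node hnode (le_refl _) (g.length + 1)
    (pvMu g node + 1) (Nat.lt_succ_of_le (pvMu_le g node)) (Nat.lt_succ_self _)
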